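-- pv_equiv track=rewrite | github.com/MARIA-TUPITA/practica_specialitate | Maria_proiect.py | ghiceste_cuvant
-- ===== SOURCE A (Python) =====
-- def ghiceste_cuvant(cuvant_start, cuvant_target):
--     cuvant_curent = list(cuvant_start)
--     incercari = 0
--
--     for i in range(len(cuvant_target)):
--         for j in range(len(cuvant_target)):
--             if i == j:
--                 if cuvant_curent[i] == "*":
--                     cuvant_curent[i] = cuvant_target[i]
--                     incercari += 1
--                 else:
--                     incercari += 1
--
--     return "".join(cuvant_curent), incercari
-- ===== SOURCE B (Python) =====
-- def ghiceste_cuvant(cuvant_start, cuvant_target):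
--     n = len(cuvant_target)
--     filled = "".join(t if s == "*" else s for s, t in zip(cuvant_start, cuvant_target))
--     return filled + cuvant_start[n:], n
-- ===== Notes on version B (the rewrite author's own statement) =====
-- stated objective: faster
-- what changed: Replaces the O(n^2) nested index loops (whose inner loop only ever acts when i == j) by a single zip pass over the two strings plus a slice for the tail; the attempt counter is returned directly as len(cuvant_target).
import Mathlib
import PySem

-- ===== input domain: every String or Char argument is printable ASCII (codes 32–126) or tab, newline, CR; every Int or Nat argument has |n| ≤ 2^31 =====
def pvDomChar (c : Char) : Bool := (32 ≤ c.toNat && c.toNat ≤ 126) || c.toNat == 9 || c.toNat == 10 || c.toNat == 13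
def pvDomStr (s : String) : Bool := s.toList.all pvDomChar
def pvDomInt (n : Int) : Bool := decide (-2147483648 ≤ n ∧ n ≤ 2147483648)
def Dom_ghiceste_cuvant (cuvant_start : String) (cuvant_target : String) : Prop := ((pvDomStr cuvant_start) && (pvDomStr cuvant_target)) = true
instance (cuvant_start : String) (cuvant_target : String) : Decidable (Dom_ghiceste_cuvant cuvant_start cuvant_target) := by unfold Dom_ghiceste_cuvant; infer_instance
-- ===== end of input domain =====

-- B replaces A's O(n^2) nested index loops by a single zip pass plus a tail slice (asymptotically faster); A=B wherever A returns, Pre_ excludes exactly A's IndexError.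


-- ===== PORT A =====
-- literal port: cuvant_curent = list(cuvant_start); nested for-loops over range(len(cuvant_target));
-- indexing/assignment via pyGetD/pySetD, total under Pre_ (inside Pre_ every index is in range).
def ghiceste_cuvant (cuvant_start : String) (cuvant_target : String) : String × Int :=
  let tl := cuvant_target.toList
  let res :=
    (PySem.List.pyRange 0 (tl.length : Int) 1).foldl
      (fun (st : List Char × Int) i =>
        (PySem.List.pyRange 0 (tl.length : Int) 1).foldl
          (fun (st : List Char × Int) j =>
            if i = j then
              if PySem.List.pyGetD st.1 i ' ' = '*' then
                (PySem.List.pySetD st.1 i (PySem.List.pyGetD tl i ' '), st.2 + 1)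
              else
                (st.1, st.2 + 1)
            else st)
          st)
      (cuvant_start.toList, (0 : Int))
  (String.ofList res.1, res.2)

-- ===== PORT B =====
-- literal port of Source B: zip the two strings, fill '*' from the target, append cuvant_start[n:].
def ghiceste_cuvant_alt (cuvant_start : String) (cuvant_target : String) : String × Int :=
  let n := cuvant_target.toList.length
  let filled := (List.zip cuvant_start.toList cuvant_target.toList).map
    (fun p => if p.1 = '*' then p.2 else p.1)
  (String.ofList (filled ++ PySem.List.slice cuvant_start.toList (some (n : Int)) none),
   (n : Int))

-- ===== PRECONDITION & SPEC =====
-- Pre_ excludes exactly the inputs where A raises IndexError (target longer than start).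
def Pre_ghiceste_cuvant (cuvant_start : String) (cuvant_target : String) : Prop :=
  cuvant_target.toList.length ≤ cuvant_start.toList.length
instance (cuvant_start : String) (cuvant_target : String) : Decidable (Pre_ghiceste_cuvant cuvant_start cuvant_target) := by unfold Pre_ghiceste_cuvant; infer_instance

def pvWitness_ghiceste_cuvant : String × String := ("*a*", "xyz")

def Spec_ghiceste_cuvant (cuvant_start : String) (cuvant_target : String) (out : String × Int) : Prop := out = ghiceste_cuvant_alt cuvant_start cuvant_target
instance (cuvant_start : String) (cuvant_target : String) (out : String × Int) : Decidable (Spec_ghiceste_cuvant cuvant_start cuvant_target out) := by unfold Spec_ghiceste_cuvant; infer_instance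

-- ===== CLAIM (what is proved, stated in full; the proofs are below) =====
def Claim_equal_ghiceste_cuvant : Prop := ∀ (cuvant_start : String) (cuvant_target : String), Dom_ghiceste_cuvant cuvant_start cuvant_target → Pre_ghiceste_cuvant cuvant_start cuvant_target → Spec_ghiceste_cuvant cuvant_start cuvant_target (ghiceste_cuvant cuvant_start cuvant_target)
-- ===== LEMMAS AND PROOFS =====

-- A's inner loop does nothing at indices j ≠ i.
theorem pv_fold_skip {α : Type} (f : α → α) (i : Int) (l : List Int) (hi : i ∉ l) (st : α) :
    l.foldl (fun st j => if i = j then f st else st) st = st := by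
  induction l generalizing st with
  | nil => rfl
  | cons a as ih =>
      simp only [List.mem_cons, not_or] at hi
      simp [List.foldl_cons, if_neg hi.1, ih hi.2]

-- A's inner loop over range(n) applies its body exactly once, at j = i.
theorem pv_fold_once {α : Type} (f : α → α) (i n : Int) (h0 : 0 ≤ i) (hn : i < n) (st : α) :
    (PySem.List.pyRange 0 n 1).foldl (fun st j => if i = j then f st else st) st = f st := by
  rw [PySem.List.pyRange_one_append 0 i n h0 (le_of_lt hn), List.foldl_append,
      pv_fold_skip f i (PySem.List.pyRange 0 i 1) (by simp [PySem.List.mem_pyRange_one]),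
      PySem.List.pyRange_one_cons hn, List.foldl_cons, if_pos rfl,
      pv_fold_skip f i (PySem.List.pyRange (i + 1) n 1) (by simp [PySem.List.mem_pyRange_one])]

-- The outer loop's invariant: after k steps the list is the filled prefix ++ untouched tail, counter = k.
theorem pv_outer (sl tl : List Char) (k : Nat) (hk : k ≤ tl.length) (hlen : tl.length ≤ sl.length) :
    (PySem.List.pyRange 0 (k : Int) 1).foldl
      (fun (st : List Char × Int) i =>
        if PySem.List.pyGetD st.1 i ' ' = '*' then
          (PySem.List.pySetD st.1 i (PySem.List.pyGetD tl i ' '), st.2 + 1)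
        else (st.1, st.2 + 1))
      (sl, (0 : Int))
    = (((List.zip sl tl).take k).map (fun p => if p.1 = '*' then p.2 else p.1) ++ sl.drop k,
       (k : Int)) := by
  induction k with
  | zero => simp
  | succ k ih =>
      have hk' : k ≤ tl.length := Nat.le_of_succ_le hk
      have hks : k < sl.length := Nat.lt_of_lt_of_le hk hlen
      have hkt : k < tl.length := hk
      have hcast : ((k + 1 : Nat) : Int) = (k : Int) + 1 := by push_cast; ring
      rw [hcast, PySem.List.pyRange_one_succ_right (by positivity), List.foldl_append, ih hk',
          List.foldl_cons, List.foldl_nil]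
      set pref := ((List.zip sl tl).take k).map (fun p => if p.1 = '*' then p.2 else p.1) with hprefdef
      have hpref : pref.length = k := by
        simp [hprefdef, List.length_take, List.length_zip]
        omega
      have hzlen : k < (List.zip sl tl).length := by
        simp [List.length_zip]; omega
      have htake : ((List.zip sl tl).take (k + 1)).map (fun p => if p.1 = '*' then p.2 else p.1)
          = pref ++ [if sl[k] = '*' then tl[k] else sl[k]] := by
        rw [List.take_add_one, List.getElem?_eq_getElem hzlen, List.getElem_zip]
        simp [hprefdef]
      rw [htake, List.append_assoc, List.singleton_append]
      have hdrop : sl.drop k = sl[k] :: sl.drop (k + 1) := List.drop_eq_getElem_cons hks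
      rw [PySem.List.pyGetD_natCast, PySem.List.pySetD_natCast, PySem.List.pyGetD_natCast]
      have hget : (pref ++ sl.drop k).getD k ' ' = sl[k] := by
        rw [hdrop, List.getD, List.getElem?_append_right (by omega), hpref]
        simp [List.getElem?_eq_getElem hks]
      have hset : (pref ++ sl.drop k).set k (tl.getD k ' ') = pref ++ tl.getD k ' ' :: sl.drop (k + 1) := by
        rw [List.set_append, if_neg (by omega), hdrop, hpref, Nat.sub_self, List.set_cons_zero]
      rw [hget]
      split_ifs with h
      · rw [hset, List.getD_eq_getElem tl ' ' hkt]
      · rw [hdrop]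

-- ===== VERDICT (by name: the statement is the Claim_ definition above) =====
theorem ghiceste_cuvant_spec : Claim_equal_ghiceste_cuvant := by
  intro s t _ hpre
  unfold Spec_ghiceste_cuvant ghiceste_cuvant ghiceste_cuvant_alt
  have hlen : t.toList.length ≤ s.toList.length := hpre
  have hcongr :
      (PySem.List.pyRange 0 (t.toList.length : Int) 1).foldl
        (fun (st : List Char × Int) i =>
          (PySem.List.pyRange 0 (t.toList.length : Int) 1).foldl
            (fun (st : List Char × Int) j =>
              if i = j then
                if PySem.List.pyGetD st.1 i ' ' = '*' then
                  (PySem.List.pySetD st.1 i (PySem.List.pyGetD t.toList i ' '), st.2 + 1)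
                else (st.1, st.2 + 1)
              else st)
            st)
        (s.toList, (0 : Int))
      = (PySem.List.pyRange 0 (t.toList.length : Int) 1).foldl
        (fun (st : List Char × Int) i =>
          if PySem.List.pyGetD st.1 i ' ' = '*' then
            (PySem.List.pySetD st.1 i (PySem.List.pyGetD t.toList i ' '), st.2 + 1)
          else (st.1, st.2 + 1))
        (s.toList, (0 : Int)) := by
    apply PySem.List.foldl_congr_mem
    intro acc i hi
    rw [PySem.List.mem_pyRange_one] at hi
    exact pv_fold_once _ i _ hi.1 hi.2 acc
  simp only [hcongr, pv_outer s.toList t.toList t.toList.length le_rfl hlen]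
  have hztake : (List.zip s.toList t.toList).take t.toList.length = List.zip s.toList t.toList := by
    apply List.take_of_length_le
    simp [List.length_zip]
  rw [hztake, PySem.List.slice_from_natCast]
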